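-- pv_equiv track=rewrite | github.com/ymzhang0/sabr | src/aris_core/logging/core.py | _parse_event_message
-- ===== SOURCE A (Python) =====
-- def _split_event_segments(message: str) -> list[str]:
--     if " | " not in message:
--         return [message]
--
--     segments: list[str] = []
--     current: list[str] = []
--     in_single_quote = False
--     index = 0
--     while index < len(message):
--         chunk = message[index : index + 3]
--         char = message[index]
--         if char == "'" and (index == 0 or message[index - 1] != "\\"):
--             in_single_quote = not in_single_quote
--             current.append(char)
--             index += 1
--             continue
--         if not in_single_quote and chunk == " | ":
--             segments.append("".join(current).strip())
--             current = []
--             index += 3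
--             continue
--         current.append(char)
--         index += 1
--     segments.append("".join(current).strip())
--     return [segment for segment in segments if segment]
--
-- def _deserialize_field(raw_value: str) -> str:
--     value = raw_value.strip()
--     if len(value) >= 2 and value[0] == "'" and value[-1] == "'":
--         inner = value[1:-1]
--         return inner.replace("\\'", "'").replace("\\n", "\n")
--     return value.replace("\\n", "\n")
--
-- def _parse_event_message(message: str) -> tuple[str | None, list[tuple[str, str]], list[str]]:
--     segments = _split_event_segments(message)
--     event: str | None = None
--     fields: list[tuple[str, str]] = []
--     loose_segments: list[str] = []
--
--     for segment in segments:
--         if "=" not in segment: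
--             loose_segments.append(segment)
--             continue
--         key, value = segment.split("=", 1)
--         normalized_key = key.strip()
--         fields.append((normalized_key, value.strip()))
--         if normalized_key == "evt" and event is None:
--             event = _deserialize_field(value)
--
--     return event, fields, loose_segments
-- ===== SOURCE B (Python) =====
-- def _split_event_segments(message: str) -> list[str]:
--     if " | " not in message:
--         return [message]
--     out: list[str] = []
--     buf: list[str] = []
--     parity = 0
--     for piece in message.split(" | "):
--         buf.append(piece)
--         for j, ch in enumerate(piece):
--             if ch == "'" and (j == 0 or piece[j - 1] != "\\"):
--                 parity ^= 1
--         if parity == 0: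
--             seg = " | ".join(buf).strip()
--             if seg:
--                 out.append(seg)
--             buf = []
--     if buf:
--         seg = " | ".join(buf).strip()
--         if seg:
--             out.append(seg)
--     return out
--
-- def _deserialize_field(raw_value: str) -> str:
--     value = raw_value.strip()
--     if len(value) >= 2 and value.startswith("'") and value.endswith("'"):
--         value = value[1:-1].replace("\\'", "'")
--     return value.replace("\\n", "\n")
--
-- def _parse_event_message(message: str) -> tuple:
--     event = None
--     fields: list = []
--     loose: list = []
--     for segment in _split_event_segments(message):
--         key, sep, value = segment.partition("=")
--         if not sep:
--             loose.append(segment)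
--         else:
--             k = key.strip()
--             fields.append((k, value.strip()))
--             if event is None and k == "evt":
--                 event = _deserialize_field(value)
--     return event, fields, loose
-- ===== Notes on version B (the rewrite author's own statement) =====
-- stated objective: alternative
-- what changed: The character-by-character quote-aware scanner of _split_event_segments is replaced by splitting the message on the pipe separator and then merging pieces back with a running parity of unescaped single quotes (emitting a segment whenever the parity returns to even); the segment loop uses str.partition instead of a guarded split on the first equals sign.
import Mathlib
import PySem

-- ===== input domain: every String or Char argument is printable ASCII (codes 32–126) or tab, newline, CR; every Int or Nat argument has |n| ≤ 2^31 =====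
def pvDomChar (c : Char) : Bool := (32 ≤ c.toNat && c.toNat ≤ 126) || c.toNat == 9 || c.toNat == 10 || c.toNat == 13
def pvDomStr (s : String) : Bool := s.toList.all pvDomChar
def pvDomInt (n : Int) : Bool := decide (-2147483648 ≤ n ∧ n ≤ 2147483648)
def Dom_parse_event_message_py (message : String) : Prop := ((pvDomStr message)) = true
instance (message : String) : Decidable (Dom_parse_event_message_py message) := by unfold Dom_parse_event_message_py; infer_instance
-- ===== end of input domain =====

-- B replaces A's character-by-character quote-aware scanner by split(" | ") followed by a
-- parity-driven merge of the pieces (different decomposition, same exact results).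

-- ===== PORT A =====

-- the while loop of _split_event_segments: rem = message[index:], prev = message[index-1] (none at index 0)
def pvASplitLoop : List Char → Option Char → List (List Char) → List Char → Bool → List (List Char)
  | [], _, segs, cur, _ => segs ++ [PySem.Chars.strip cur]
  | c :: rest, prev, segs, cur, inq =>
    if c = '\'' ∧ (prev = none ∨ prev ≠ some '\\') then
      pvASplitLoop rest (some c) segs (cur ++ [c]) (!inq)
    else if inq = false ∧ List.take 3 (c :: rest) = [' ', '|', ' '] then
      pvASplitLoop (List.drop 3 (c :: rest)) (some ' ') (segs ++ [PySem.Chars.strip cur]) [] inq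
    else
      pvASplitLoop rest (some c) segs (cur ++ [c]) inq
  termination_by rem => rem.length
  decreasing_by all_goals (simp; try omega)

def pvASplit (message : List Char) : List (List Char) :=
  if PySem.Chars.isIn [' ', '|', ' '] message = false then [message]
  else (pvASplitLoop message none [] [] false).filter (fun s => s ≠ [])

def pvADeserialize (raw : List Char) : List Char :=
  let value := PySem.Chars.strip raw
  if 2 ≤ value.length ∧ PySem.List.pyGet? value 0 = some '\'' ∧ PySem.List.pyGet? value (-1) = some '\'' then
    let inner := PySem.List.slice value (some 1) (some (-1))
    PySem.Chars.replace (PySem.Chars.replace inner ['\\', '\''] ['\'']) ['\\', 'n'] ['\n']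
  else
    PySem.Chars.replace value ['\\', 'n'] ['\n']

-- body of A's for-loop over segments; segment.split("=", 1) with "=" present is
-- (segment[:i], segment[i+1:]) at i = segment.find("=") — exact
def pvAStep (st : Option (List Char) × List (List Char × List Char) × List (List Char))
    (segment : List Char) : Option (List Char) × List (List Char × List Char) × List (List Char) :=
  if PySem.Chars.isIn ['='] segment = false then (st.1, st.2.1, st.2.2 ++ [segment])
  else
    let i := (PySem.Chars.find segment ['=']).toNat
    let nk := PySem.Chars.strip (segment.take i)
    let value := segment.drop (i + 1)
    let fields := st.2.1 ++ [(nk, PySem.Chars.strip value)]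
    let event := if nk = ['e', 'v', 't'] ∧ st.1 = none then some (pvADeserialize value) else st.1
    (event, fields, st.2.2)

def parse_event_message_py (message : String) : Option String × (List (String × String)) × List String :=
  let r := (pvASplit message.toList).foldl pvAStep (none, [], [])
  (r.1.map String.ofList, r.2.1.map (fun p => (String.ofList p.1, String.ofList p.2)), r.2.2.map String.ofList)

-- ===== PORT B =====

-- running parity of unescaped single quotes inside one piece; prev = preceding char in the piece
def pvBParity : List Char → Option Char → Bool → Bool
  | [], _, p => p
  | c :: rest, prev, p =>
    pvBParity rest (some c) (if c = '\'' ∧ (prev = none ∨ prev ≠ some '\\') then !p else p)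

-- the for-loop over message.split(" | ") plus the final flush of Source B
def pvBSplitFold : List (List Char) → Bool → List (List Char) → List (List Char) → List (List Char)
  | [], _, buf, out =>
    if buf ≠ [] then
      let seg := PySem.Chars.strip (PySem.Chars.join [' ', '|', ' '] buf)
      if seg ≠ [] then out ++ [seg] else out
    else out
  | piece :: rest, parity, buf, out =>
    let buf' := buf ++ [piece]
    let parity' := pvBParity piece none parity
    if parity' = false then
      let seg := PySem.Chars.strip (PySem.Chars.join [' ', '|', ' '] buf')
      pvBSplitFold rest false [] (if seg ≠ [] then out ++ [seg] else out)
    else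
      pvBSplitFold rest parity' buf' out

def pvBSplit (message : List Char) : List (List Char) :=
  if PySem.Chars.isIn [' ', '|', ' '] message = false then [message]
  else pvBSplitFold (PySem.Chars.splitOn message [' ', '|', ' ']) false [] []

def pvBDeserialize (raw : List Char) : List Char :=
  let v := PySem.Chars.strip raw
  let v' :=
    if 2 ≤ v.length ∧ PySem.Chars.startswith v ['\''] = true ∧ PySem.Chars.endswith v ['\''] = true then
      PySem.Chars.replace (PySem.List.slice v (some 1) (some (-1))) ['\\', '\''] ['\'']
    else v
  PySem.Chars.replace v' ['\\', 'n'] ['\n']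

-- body of B's for-loop; partition("=") ported through find
def pvBStep (st : Option (List Char) × List (List Char × List Char) × List (List Char))
    (segment : List Char) : Option (List Char) × List (List Char × List Char) × List (List Char) :=
  let i := PySem.Chars.find segment ['=']
  if i = -1 then (st.1, st.2.1, st.2.2 ++ [segment])
  else
    let k := PySem.Chars.strip (segment.take i.toNat)
    let v := segment.drop (i.toNat + 1)
    ((if st.1 = none ∧ k = ['e', 'v', 't'] then some (pvBDeserialize v) else st.1),
      st.2.1 ++ [(k, PySem.Chars.strip v)], st.2.2)

def parse_event_message_py_alt (message : String) : Option String × (List (String × String)) × List String :=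
  let r := (pvBSplit message.toList).foldl pvBStep (none, [], [])
  (r.1.map String.ofList, r.2.1.map (fun p => (String.ofList p.1, String.ofList p.2)), r.2.2.map String.ofList)

-- ===== PRECONDITION & SPEC =====
def Spec_parse_event_message_py (message : String) (out : Option String × (List (String × String)) × List String) : Prop := out = parse_event_message_py_alt message
instance (message : String) (out : Option String × (List (String × String)) × List String) : Decidable (Spec_parse_event_message_py message out) := by unfold Spec_parse_event_message_py; infer_instance

-- ===== CLAIM (what is proved, stated in full; the proofs are below) =====
def Claim_equal_parse_event_message_py : Prop := ∀ (message : String), Dom_parse_event_message_py message → Spec_parse_event_message_py message (parse_event_message_py message)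

-- ===== LEMMAS AND PROOFS =====

theorem pv_sw (v : List Char) (c : Char) : (PySem.List.pyGet? v 0 = some c) ↔ PySem.Chars.startswith v [c] = true := by
  rw [PySem.Chars.startswith_iff]
  rcases v with _ | ⟨a, t⟩
  · simp [PySem.List.pyGet?, PySem.List.pyIdx?]
  · simp [PySem.List.pyGet?, PySem.List.pyIdx?]; exact eq_comm

theorem pv_ew (v : List Char) (c : Char) : (PySem.List.pyGet? v (-1) = some c) ↔ PySem.Chars.endswith v [c] = true := by
  rw [PySem.Chars.endswith_iff, PySem.List.pyGet?_neg_one, ← List.reverse_prefix]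
  rcases h : v.reverse with _ | ⟨a, t⟩
  · simp [List.getLast?_eq_head?_reverse, h]
  · simp [List.getLast?_eq_head?_reverse, h]; exact eq_comm

theorem deserialize_eq (raw : List Char) : pvADeserialize raw = pvBDeserialize raw := by
  unfold pvADeserialize pvBDeserialize
  have hiff : (2 ≤ (PySem.Chars.strip raw).length ∧ PySem.List.pyGet? (PySem.Chars.strip raw) 0 = some '\'' ∧ PySem.List.pyGet? (PySem.Chars.strip raw) (-1) = some '\'')
      ↔ (2 ≤ (PySem.Chars.strip raw).length ∧ PySem.Chars.startswith (PySem.Chars.strip raw) ['\''] = true ∧ PySem.Chars.endswith (PySem.Chars.strip raw) ['\''] = true) := by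
    rw [pv_sw, pv_ew]
  simp only []
  split_ifs with h1 h2 h3
  · rfl
  · exact absurd (hiff.mp h1) h2
  · exact absurd (hiff.mpr h3) h1
  · rfl

theorem step_eq : pvAStep = pvBStep := by
  funext st seg
  unfold pvAStep pvBStep
  have hiff : (PySem.Chars.isIn ['='] seg = false) ↔ (PySem.Chars.find seg ['='] = -1) := by
    simp [PySem.Chars.isIn]
  simp only []
  by_cases h1 : PySem.Chars.isIn ['='] seg = false
  · rw [if_pos h1, if_pos (hiff.mp h1)]
  · rw [if_neg h1, if_neg (fun hf => h1 (hiff.mpr hf))]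
    have hc : (PySem.Chars.strip (List.take (PySem.Chars.find seg ['=']).toNat seg) = ['e', 'v', 't'] ∧ st.1 = none)
        ↔ (st.1 = none ∧ PySem.Chars.strip (List.take (PySem.Chars.find seg ['=']).toNat seg) = ['e', 'v', 't']) := and_comm
    by_cases h2 : st.1 = none ∧ PySem.Chars.strip (List.take (PySem.Chars.find seg ['=']).toNat seg) = ['e', 'v', 't']
    · rw [if_pos (hc.mpr h2), if_pos h2, deserialize_eq]
    · rw [if_neg (fun hh => h2 (hc.mp hh)), if_neg h2]

-- mySplit: a direct greedy recursion equal to PySem.Chars.splitOn · [' ','|',' ']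
def pvMySplit : List Char → List (List Char)
  | [] => [[]]
  | c :: rest =>
    if [' ', '|', ' '].isPrefixOf (c :: rest) then [] :: pvMySplit (List.drop 3 (c :: rest))
    else (pvMySplit rest).modifyHead (c :: ·)
  termination_by l => l.length
  decreasing_by all_goals (simp; try omega)

theorem go_spec (fuel : Nat) : ∀ (l cur : List Char) (acc : List (List Char)), l.length < fuel →
    PySem.Chars.splitOn.go [' ', '|', ' '] fuel l cur acc
      = acc.reverse ++ (pvMySplit l).modifyHead (cur.reverse ++ ·) := by
  induction fuel with
  | zero => intro l cur acc h; omega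
  | succ fuel ih =>
    intro l cur acc h
    match l with
    | [] =>
      rw [PySem.Chars.splitOn.go]
      simp [pvMySplit]
      omega
    | c :: rest =>
      rw [PySem.Chars.splitOn.go]
      by_cases hp : [' ', '|', ' '].isPrefixOf (c :: rest)
      · rw [if_pos hp]
        simp only [List.length_cons, List.length_nil]
        rw [ih (List.drop 3 (c :: rest)) [] (cur.reverse :: acc) (by simp at h ⊢; omega)]
        rw [show pvMySplit (c :: rest) = [] :: pvMySplit (List.drop 3 (c :: rest)) from by
          rw [pvMySplit]; simp [hp]]
        cases pvMySplit (List.drop 3 (c :: rest)) <;> simp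
      · rw [if_neg hp]
        rw [ih rest (c :: cur) acc (by simp at h ⊢; omega)]
        rw [show pvMySplit (c :: rest) = (pvMySplit rest).modifyHead (c :: ·) from by
          rw [pvMySplit]; simp [hp]]
        cases pvMySplit rest <;> simp

theorem splitOn_eq_mySplit (l : List Char) :
    PySem.Chars.splitOn l [' ', '|', ' '] = pvMySplit l := by
  rw [PySem.Chars.splitOn, go_spec (l.length + 1) l [] [] (by omega)]
  cases pvMySplit l <;> simp

def pvPrevOk (pacc : List Char) (prev : Option Char) : Prop :=
  match pacc with
  | [] => prev ≠ some '\\'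
  | _ => prev = pacc.getLast?

-- last character before the next position: getLast? of the processed part, else the boundary char
def pvLastPrev (xs : List Char) (prev0 : Option Char) : Option Char := xs.getLast?.or prev0

theorem pv_lastPrev_cons (a : Char) (xs : List Char) (prev0 : Option Char) :
    pvLastPrev (a :: xs) prev0 = pvLastPrev xs (some a) := by
  cases xs with
  | nil => simp [pvLastPrev]
  | cons h t =>
    unfold pvLastPrev
    rw [List.getLast?_cons_cons]
    rcases hx : (h :: t).getLast? with _ | x
    · simp at hx
    · simp

theorem parity_snoc (xs : List Char) (c : Char) : ∀ (prev0 : Option Char) (q : Bool),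
    pvBParity (xs ++ [c]) prev0 q =
      (if c = '\'' ∧ (pvLastPrev xs prev0 = none ∨ pvLastPrev xs prev0 ≠ some '\\') then
        !(pvBParity xs prev0 q) else pvBParity xs prev0 q) := by
  induction xs with
  | nil => intro prev0 q; simp [pvBParity, pvLastPrev]
  | cons a xs ih =>
    intro prev0 q
    simp only [List.cons_append, pvBParity]
    rw [ih, pv_lastPrev_cons]

theorem join_cons_ne (sep x : List Char) (l : List (List Char)) (h : l ≠ []) :
    PySem.Chars.join sep (x :: l) = x ++ sep ++ PySem.Chars.join sep l := by
  rcases l with _ | ⟨y, t⟩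
  · exact absurd rfl h
  · simp [PySem.Chars.join, List.intercalate]

theorem join_snoc (sep : List Char) (buf : List (List Char)) (p : List Char) (c : Char) :
    PySem.Chars.join sep (buf ++ [p ++ [c]]) = PySem.Chars.join sep (buf ++ [p]) ++ [c] := by
  induction buf with
  | nil => simp [PySem.Chars.join, List.intercalate]
  | cons x bs ih =>
    rw [List.cons_append, List.cons_append,
      join_cons_ne sep x (bs ++ [p ++ [c]]) (by simp),
      join_cons_ne sep x (bs ++ [p]) (by simp), ih]
    simp

theorem join_snoc_nil (sep : List Char) (xs : List (List Char)) (h : xs ≠ []) :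
    PySem.Chars.join sep (xs ++ [[]]) = PySem.Chars.join sep xs ++ sep := by
  induction xs with
  | nil => exact absurd rfl h
  | cons x bs ih =>
    rcases bs with _ | ⟨y, t⟩
    · simp [PySem.Chars.join, List.intercalate]
    · rw [List.cons_append,
        join_cons_ne sep x ((y :: t) ++ [[]]) (by simp),
        join_cons_ne sep x (y :: t) (by simp), ih (by simp)]
      simp

theorem pv_prefix_iff (l : List Char) :
    [' ', '|', ' '].isPrefixOf l = true ↔ List.take 3 l = [' ', '|', ' '] := by
  rw [List.isPrefixOf_iff_prefix, List.prefix_iff_eq_take]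
  constructor <;> (intro h; exact h.symm)

theorem pv_filter_snoc (segs : List (List Char)) (x : List Char) :
    (segs ++ [x]).filter (fun s => s ≠ []) =
      (if x ≠ [] then segs.filter (fun s => s ≠ []) ++ [x] else segs.filter (fun s => s ≠ [])) := by
  rw [List.filter_append]
  by_cases hx : x = [] <;> simp [hx, List.filter]

-- the condition A tests (with prev) agrees with the one pvBParity tests (with pvLastPrev) under pvPrevOk
theorem pv_cond_iff (pacc : List Char) (prev : Option Char) (h : pvPrevOk pacc prev) :
    ((prev = none ∨ prev ≠ some '\\')
      ↔ (pvLastPrev pacc none = none ∨ pvLastPrev pacc none ≠ some '\\')) := by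
  rcases pacc with _ | ⟨a, t⟩
  · unfold pvPrevOk at h
    simp [pvLastPrev]
    rcases prev with _ | p <;> simp_all
  · unfold pvPrevOk at h
    rcases hx : (a :: t).getLast? with _ | x
    · simp at hx
    · rw [h, hx]
      unfold pvLastPrev
      rw [hx]
      simp

theorem aloop_sep_odd (t : List Char) (prev : Option Char) (segs : List (List Char)) (cur : List Char) :
    pvASplitLoop (' ' :: '|' :: ' ' :: t) prev segs cur true
      = pvASplitLoop t (some ' ') segs (((cur ++ [' ']) ++ ['|']) ++ [' ']) true := by
  rw [pvASplitLoop]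
  rw [if_neg (by simp), if_neg (by simp)]
  rw [pvASplitLoop]
  rw [if_neg (by simp), if_neg (by simp)]
  rw [pvASplitLoop]
  rw [if_neg (by simp), if_neg (by simp)]

theorem fuse_nil (pacc : List Char) (q0 : Bool) (buf segs : List (List Char)) (prev : Option Char) :
    (pvASplitLoop [] prev segs (PySem.Chars.join [' ', '|', ' '] (buf ++ [pacc]))
        (pvBParity pacc none q0)).filter (fun s => s ≠ [])
      = pvBSplitFold [pacc] q0 buf (segs.filter (fun s => s ≠ [])) := by
  rw [pvASplitLoop, pvBSplitFold, pv_filter_snoc]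
  by_cases hq : pvBParity pacc none q0 = false
  · rw [if_pos hq, pvBSplitFold]
    by_cases hx : PySem.Chars.strip (PySem.Chars.join [' ', '|', ' '] (buf ++ [pacc])) = [] <;>
      simp [hx]
  · rw [if_neg hq, pvBSplitFold]
    by_cases hx : PySem.Chars.strip (PySem.Chars.join [' ', '|', ' '] (buf ++ [pacc])) = [] <;>
      simp [hx]

theorem fuse (n : Nat) : ∀ l : List Char, l.length ≤ n →
    ∀ (pacc : List Char) (q0 : Bool) (buf segs : List (List Char)) (prev : Option Char),
    pvPrevOk pacc prev →
    (pvASplitLoop l prev segs (PySem.Chars.join [' ', '|', ' '] (buf ++ [pacc]))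
        (pvBParity pacc none q0)).filter (fun s => s ≠ [])
      = pvBSplitFold ((pvMySplit l).modifyHead (pacc ++ ·)) q0 buf
          (segs.filter (fun s => s ≠ [])) := by
  induction n with
  | zero =>
    intro l hl pacc q0 buf segs prev hprev
    rcases l with _ | ⟨c, rest⟩
    · rw [show (pvMySplit []).modifyHead (pacc ++ ·) = [pacc] by simp [pvMySplit]]
      exact fuse_nil pacc q0 buf segs prev
    · simp at hl
  | succ n ih =>
    intro l hl pacc q0 buf segs prev hprev
    rcases l with _ | ⟨c, rest⟩
    · rw [show (pvMySplit []).modifyHead (pacc ++ ·) = [pacc] by simp [pvMySplit]]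
      exact fuse_nil pacc q0 buf segs prev
    · by_cases hquote : c = '\'' ∧ (prev = none ∨ prev ≠ some '\\')
      · -- quote toggle step
        have hp : [' ', '|', ' '].isPrefixOf (c :: rest) = false := by
          rcases hquote with ⟨rfl, -⟩
          simp [List.isPrefixOf]
        rw [pvASplitLoop, if_pos hquote]
        have hpar : pvBParity (pacc ++ [c]) none q0 = !(pvBParity pacc none q0) := by
          rw [parity_snoc]
          rw [if_pos ⟨hquote.1, (pv_cond_iff pacc prev hprev).mp hquote.2⟩]
        have hcur : PySem.Chars.join [' ', '|', ' '] (buf ++ [pacc]) ++ [c]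
            = PySem.Chars.join [' ', '|', ' '] (buf ++ [pacc ++ [c]]) := (join_snoc _ _ _ _).symm
        rw [hcur, ← hpar,
          ih rest (by simp at hl; omega) (pacc ++ [c]) q0 buf segs (some c)
            (by unfold pvPrevOk; cases pacc with
                | nil => simp
                | cons a t => exact (List.getLast?_concat).symm),
          show pvMySplit (c :: rest) = (pvMySplit rest).modifyHead (c :: ·) from by
            rw [pvMySplit]; simp [hp],
          show List.modifyHead (fun x => (pacc ++ [c]) ++ x) (pvMySplit rest)
              = List.modifyHead (fun x => pacc ++ x) (List.modifyHead (fun x => c :: x) (pvMySplit rest)) from by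
            cases pvMySplit rest <;> simp]
      · by_cases hp : [' ', '|', ' '].isPrefixOf (c :: rest) = true
        · have htake : List.take 3 (c :: rest) = [' ', '|', ' '] := (pv_prefix_iff _).mp hp
          obtain ⟨t, ht⟩ : ∃ t, c :: rest = [' ', '|', ' '] ++ t := by
            obtain ⟨t, ht⟩ := List.isPrefixOf_iff_prefix.mp hp
            exact ⟨t, ht.symm⟩
          have hmys : pvMySplit (c :: rest) = [] :: pvMySplit t := by
            rw [pvMySplit]
            simp only [hp, if_true]
            congr 1
            rw [ht]
            simp
          by_cases hqq : pvBParity pacc none q0 = false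
          · -- parity even at the separator: A emits here, so does B
            rw [pvASplitLoop, if_neg hquote, if_pos ⟨hqq, htake⟩]
            have hdrop : List.drop 3 (c :: rest) = t := by rw [ht]; simp
            rw [hdrop]
            have := ih t (by rw [ht] at hl; simp at hl; omega) [] false [] 
              (segs ++ [PySem.Chars.strip (PySem.Chars.join [' ', '|', ' '] (buf ++ [pacc]))])
              (some ' ') (by unfold pvPrevOk; simp)
            rw [show PySem.Chars.join [' ', '|', ' '] ([] ++ [[]]) = ([] : List Char) from by
            simp [PySem.Chars.join, List.intercalate]] at this
            rw [show pvBParity [] none false = false from rfl] at this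
            rw [hqq, this, hmys, List.modifyHead_cons, pvBSplitFold,
              show List.modifyHead (fun x => [] ++ x) (pvMySplit t) = pvMySplit t from by
                cases pvMySplit t <;> simp,
              pv_filter_snoc]
            simp only [List.append_nil, hqq]
            simp
          · -- parity odd: A walks through the three separator chars, B keeps merging
            have hqt : pvBParity pacc none q0 = true := by
              revert hqq; cases pvBParity pacc none q0 <;> simp
            obtain ⟨hc, hr⟩ := List.cons_eq_cons.mp ht
            subst hc; subst hr
            rw [show ' ' :: List.append ['|', ' '] t = ' ' :: '|' :: ' ' :: t from rfl] at *
            rw [hqt, aloop_sep_odd]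
            have hcur3 : ((PySem.Chars.join [' ', '|', ' '] (buf ++ [pacc]) ++ [' ']) ++ ['|']) ++ [' ']
                = PySem.Chars.join [' ', '|', ' '] ((buf ++ [pacc]) ++ [[]]) := by
              rw [join_snoc_nil _ _ (by simp)]
              simp
            have := ih t (by simp at hl; omega) [] true (buf ++ [pacc]) segs (some ' ')
              (by unfold pvPrevOk; simp)
            rw [show pvBParity [] none true = true from rfl] at this
            rw [hcur3, this, hmys]
            rw [show List.modifyHead (fun x => pacc ++ x) ([] :: pvMySplit t) = pacc :: pvMySplit t from by simp,
              pvBSplitFold]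
            rw [show pvBParity pacc none q0 = true from hqt, if_neg (by simp)]
            congr 1
            cases pvMySplit t <;> simp
        · -- plain character: A appends c, the running piece grows by c, parity unchanged
          rw [pvASplitLoop, if_neg hquote,
            if_neg (fun hh : pvBParity pacc none q0 = false ∧ List.take 3 (c :: rest) = [' ', '|', ' '] =>
              hp ((pv_prefix_iff _).mpr hh.2))]
          have hpar : pvBParity (pacc ++ [c]) none q0 = pvBParity pacc none q0 := by
            rw [parity_snoc,
              if_neg (fun hh => hquote ⟨hh.1, (pv_cond_iff pacc prev hprev).mpr hh.2⟩)]
          have hcur : PySem.Chars.join [' ', '|', ' '] (buf ++ [pacc]) ++ [c]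
              = PySem.Chars.join [' ', '|', ' '] (buf ++ [pacc ++ [c]]) := (join_snoc _ _ _ _).symm
          rw [hcur, ← hpar,
            ih rest (by simp at hl; omega) (pacc ++ [c]) q0 buf segs (some c)
              (by unfold pvPrevOk; cases pacc with
                  | nil => simp
                  | cons a t => exact (List.getLast?_concat).symm),
            show pvMySplit (c :: rest) = (pvMySplit rest).modifyHead (c :: ·) from by
              rw [pvMySplit]; simp [hp],
            show List.modifyHead (fun x => (pacc ++ [c]) ++ x) (pvMySplit rest)
                = List.modifyHead (fun x => pacc ++ x) (List.modifyHead (fun x => c :: x) (pvMySplit rest)) from by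
              cases pvMySplit rest <;> simp]

theorem split_eq (l : List Char) : pvASplit l = pvBSplit l := by
  unfold pvASplit pvBSplit
  by_cases hin : PySem.Chars.isIn [' ', '|', ' '] l = false
  · rw [if_pos hin, if_pos hin]
  · rw [if_neg hin, if_neg hin, splitOn_eq_mySplit]
    have := fuse l.length l (le_refl _) [] false [] [] none (by unfold pvPrevOk; simp)
    rw [show PySem.Chars.join [' ', '|', ' '] ([] ++ [[]]) = ([] : List Char) from by
      simp [PySem.Chars.join, List.intercalate]] at this
    rw [show pvBParity [] none false = false from rfl] at this
    rw [show List.filter (fun s => s ≠ []) ([] : List (List Char)) = [] from rfl] at this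
    rw [this]
    congr 1
    cases pvMySplit l <;> simp



-- ===== VERDICT (by name: the statement is the Claim_ definition above) =====
theorem parse_event_message_py_spec : Claim_equal_parse_event_message_py := by
  intro message _
  unfold Spec_parse_event_message_py parse_event_message_py parse_event_message_py_alt
  rw [split_eq, step_eq]
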